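-- pv_equiv track=rewrite | github.com/openharmony/ark_runtime_core | scripts/memdump.py | pretty_alloc_sizes
-- ===== SOURCE A (Python) =====
-- def pretty_alloc_sizes(sizes):
--     """Prettifies allocatation sizes"""
--
--     min_size = sizes[0]
--     max_size = min_size
--     for size in sizes:
--         if size < min_size:
--             min_size = size
--         elif size > max_size:
--             max_size = size
--
--     if min_size == max_size:
--         return 'all {} bytes'.format(min_size)
--
--     return 'from {} to {} bytes'.format(min_size, max_size)
-- ===== SOURCE B (Python) =====
-- def pretty_alloc_sizes(sizes):
--     """Prettifies allocatation sizes"""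
--
--     srt = sorted(sizes)
--     min_size = srt[0]
--     max_size = srt[-1]
--
--     if min_size == max_size:
--         return 'all {} bytes'.format(min_size)
--
--     return 'from {} to {} bytes'.format(min_size, max_size)
-- ===== Notes on version B (the rewrite author's own statement) =====
-- stated objective: alternative
-- what changed: Replaces A's fused single-pass if/elif min/max scan with sort-once-take-endpoints: sort the list and read the minimum at index 0 and the maximum at index -1.
import Mathlib
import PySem

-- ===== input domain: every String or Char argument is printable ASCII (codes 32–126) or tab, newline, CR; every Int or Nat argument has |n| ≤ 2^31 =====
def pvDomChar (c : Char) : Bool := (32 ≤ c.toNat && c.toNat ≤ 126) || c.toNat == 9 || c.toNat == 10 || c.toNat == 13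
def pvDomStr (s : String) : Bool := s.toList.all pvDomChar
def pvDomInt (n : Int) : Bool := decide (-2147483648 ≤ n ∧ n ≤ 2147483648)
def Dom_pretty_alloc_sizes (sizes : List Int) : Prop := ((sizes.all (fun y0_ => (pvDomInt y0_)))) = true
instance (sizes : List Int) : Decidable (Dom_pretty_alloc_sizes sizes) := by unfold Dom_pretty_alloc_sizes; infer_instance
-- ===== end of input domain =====

-- B replaces A's fused single-pass if/elif min/max scan with sort-once-take-endpoints:
-- sort the list, read the minimum at index 0 and the maximum at index -1 (objective: alternative).

-- ===== PORT A =====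
def pretty_alloc_sizes (sizes : List Int) : String :=
  match sizes with
  | [] => ""   -- unreachable under Pre_ (Python raises IndexError on sizes[0])
  | s0 :: _ =>
    let p := sizes.foldl (fun (st : Int × Int) size =>
      if size < st.1 then (size, st.2)
      else if size > st.2 then (st.1, size)
      else st) (s0, s0)
    if p.1 = p.2 then "all " ++ PySem.Int.toStr p.1 ++ " bytes"
    else "from " ++ PySem.Int.toStr p.1 ++ " to " ++ PySem.Int.toStr p.2 ++ " bytes"

-- ===== PORT B =====
def pretty_alloc_sizes_alt (sizes : List Int) : String :=
  let srt := PySem.List.sorted sizes (fun x => x) false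
  match PySem.List.pyGet? srt 0, PySem.List.pyGet? srt (-1) with
  | some min_size, some max_size =>
    if min_size = max_size then "all " ++ PySem.Int.toStr min_size ++ " bytes"
    else "from " ++ PySem.Int.toStr min_size ++ " to " ++ PySem.Int.toStr max_size ++ " bytes"
  | _, _ => ""   -- unreachable under Pre_ (srt[0] raises IndexError on the empty list)

-- ===== PRECONDITION & SPEC =====
-- Pre_ excludes the empty list, on which A raises IndexError (and B raises IndexError too).
def Pre_pretty_alloc_sizes (sizes : List Int) : Prop := sizes ≠ []
instance (sizes : List Int) : Decidable (Pre_pretty_alloc_sizes sizes) := by unfold Pre_pretty_alloc_sizes; infer_instance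
def pvWitness_pretty_alloc_sizes : List Int := [3, -1, 7]

def Spec_pretty_alloc_sizes (sizes : List Int) (out : String) : Prop := out = pretty_alloc_sizes_alt sizes
instance (sizes : List Int) (out : String) : Decidable (Spec_pretty_alloc_sizes sizes out) := by unfold Spec_pretty_alloc_sizes; infer_instance

-- ===== CLAIM (what is proved, stated in full; the proofs are below) =====
def Claim_equal_pretty_alloc_sizes : Prop := ∀ (sizes : List Int), Dom_pretty_alloc_sizes sizes → Pre_pretty_alloc_sizes sizes → Spec_pretty_alloc_sizes sizes (pretty_alloc_sizes sizes)

-- ===== LEMMAS AND PROOFS =====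

-- A's fused scan, started from a state (mn, mx) with mn ≤ mx, computes the pair of the
-- running minimum and the running maximum.
theorem pv_fused_eq_minmax (t : List Int) : ∀ (mn mx : Int), mn ≤ mx →
    t.foldl (fun (st : Int × Int) size =>
      if size < st.1 then (size, st.2)
      else if size > st.2 then (st.1, size)
      else st) (mn, mx) = (t.foldl min mn, t.foldl max mx) := by
  induction t with
  | nil => intro mn mx _; rfl
  | cons s t ih =>
    intro mn mx h
    simp only [List.foldl]
    by_cases h1 : s < mn
    · simp only [if_pos h1]
      rw [show min mn s = s by omega, show max mx s = mx by omega]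
      exact ih s mx (by omega)
    · simp only [if_neg h1]
      by_cases h2 : s > mx
      · simp only [if_pos h2]
        rw [show min mn s = mn by omega, show max mx s = s by omega]
        exact ih mn s (by omega)
      · simp only [if_neg h2]
        rw [show min mn s = mn by omega, show max mx s = mx by omega]
        exact ih mn mx h

-- every element of a (· ≤ ·)-pairwise list is at most its last element
theorem pv_pairwise_le_getLast : ∀ (l : List Int) (h : l ≠ []),
    l.Pairwise (· ≤ ·) → ∀ y ∈ l, y ≤ l.getLast h := by
  intro l
  induction l with
  | nil => intro h; exact absurd rfl h
  | cons a l ih =>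
    intro _ hp y hy
    rcases List.pairwise_cons.mp hp with ⟨ha, hl⟩
    match l, hy with
    | [], hy => simp at hy; simp [hy]
    | b :: l', hy =>
      rw [List.getLast_cons (by simp)]
      rcases List.mem_cons.mp hy with rfl | hy'
      · exact le_trans (ha _ (List.getLast_mem _)) (le_refl _)
      · exact ih (by simp) hl y hy'

-- ===== VERDICT (by name: the statement is the Claim_ definition above) =====
theorem pretty_alloc_sizes_spec : Claim_equal_pretty_alloc_sizes := by
  intro sizes _ hpre
  match sizes with
  | [] => exact absurd rfl hpre
  | s0 :: t =>
    show pretty_alloc_sizes (s0 :: t) = pretty_alloc_sizes_alt (s0 :: t)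
    -- names for both sides' quantities
    set srt := PySem.List.sorted (s0 :: t) (fun x => x) false with hsrt
    have hperm : srt.Perm (s0 :: t) := PySem.List.sorted_perm _ _ _
    have hne : srt ≠ [] := by
      intro h0; have := hperm.length_eq; simp [h0] at this
    obtain ⟨m, t', hm⟩ : ∃ m t', srt = m :: t' := by
      cases hsrt2 : srt with
      | nil => exact absurd hsrt2 hne
      | cons m t' => exact ⟨m, t', rfl⟩
    -- min side: head of sorted = foldl min
    have hmin_le : ∀ y ∈ (s0 :: t), m ≤ y :=
      PySem.List.key_head_sorted_le (s0 :: t) (fun x => x) hm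
    have hfmin := PySem.List.foldl_min_le t s0
    have hfmin_mem : t.foldl min s0 = s0 ∨ t.foldl min s0 ∈ t := PySem.List.foldl_min_mem t s0
    have hmin_eq : m = t.foldl min s0 := by
      have h1 : m ≤ t.foldl min s0 := by
        rcases hfmin_mem with h | h
        · rw [h]; exact hmin_le s0 (by simp)
        · exact hmin_le _ (by simp [h])
      have h2 : t.foldl min s0 ≤ m := by
        have hmem : m ∈ (s0 :: t) := hperm.mem_iff.mp (by simp [hm])
        rcases List.mem_cons.mp hmem with rfl | h
        · exact hfmin.1
        · exact hfmin.2 _ h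
      omega
    -- max side: last of sorted = foldl max
    have hpw : srt.Pairwise (· ≤ ·) := by
      have := PySem.List.sorted_pairwise (xs := s0 :: t) (key := fun x => x)
      simpa using this
    have hmax_ge : ∀ y ∈ (s0 :: t), y ≤ srt.getLast hne := by
      intro y hy
      exact pv_pairwise_le_getLast srt hne hpw y (hperm.mem_iff.mpr hy)
    have hfmax := PySem.List.le_foldl_max t s0
    have hfmax_mem : t.foldl max s0 = s0 ∨ t.foldl max s0 ∈ t := PySem.List.foldl_max_mem t s0
    have hmax_eq : srt.getLast hne = t.foldl max s0 := by
      have h1 : srt.getLast hne ≤ t.foldl max s0 := by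
        have hmem : srt.getLast hne ∈ (s0 :: t) :=
          hperm.mem_iff.mp (List.getLast_mem hne)
        rcases List.mem_cons.mp hmem with heq | h
        · rw [heq]; exact hfmax.1
        · exact hfmax.2 _ h
      have h2 : t.foldl max s0 ≤ srt.getLast hne := by
        rcases hfmax_mem with h | h
        · rw [h]; exact hmax_ge s0 (by simp)
        · exact hmax_ge _ (by simp [h])
      omega
    -- assemble
    have hget0 : PySem.List.pyGet? srt 0 = some m := by
      rw [hm]; exact PySem.List.pyGet?_zero_cons m t'
    have hgetn1 : PySem.List.pyGet? srt (-1) = some (srt.getLast hne) := by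
      rw [PySem.List.pyGet?_neg_one, List.getLast?_eq_getLast_of_ne_nil hne]
    simp only [pretty_alloc_sizes, pretty_alloc_sizes_alt, ← hsrt, hget0, hgetn1,
      List.foldl]
    rw [if_neg (lt_irrefl s0), if_neg (lt_irrefl s0), pv_fused_eq_minmax t s0 s0 le_rfl]
    simp only [← hmin_eq, ← hmax_eq]
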